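-- pv_equiv track=rewrite | github.com/colinjroberts/advent-of-code-2023 | python/p09.py | extend_differentiated_list
-- ===== SOURCE A (Python) =====
-- def extend_differentiated_list(list_of_differences, reverse=False):
--
--     # For part 2
--     if reverse:
--         # iterate over each level of differences backwards starting with 0s
--         amount_to_add = 0
--         for i, lod in enumerate(list_of_differences[::-1]):
--             # Add a zero to the beginning of list of zeros to get things
--             # started, then move to the next loop
--             if i == 0:
--                 lod.insert(0,0)
--                 continue
--
--             # For every other loop, take the first element from the
--             # previous level and subtract it from the first item from this layer
--             amount_to_add = list_of_differences[::-1][i-1][0]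
--             lod.insert(0, lod[0] - amount_to_add)
--
--     # For part 1
--     else:
--         amount_to_add = 0
--         # iterate over each level of differences backwards starting with 0s
--         for i, lod in enumerate(list_of_differences[::-1]):
--             # Add a zero to the end of list of zeros to get things
--             # started, then move to the next loop
--             if i == 0:
--                 lod.append(0)
--                 continue
--
--             # For every other loop, take the last element from the
--             # previous level and add it to the last item from this layer
--             amount_to_add = list_of_differences[::-1][i-1][-1]
--             lod.append(lod[-1] + amount_to_add)
--
--     return list_of_differences
-- ===== SOURCE B (Python) =====
-- def extend_differentiated_list(list_of_differences, reverse=False):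
--     # Staged algebraic algorithm, no reversal: read all edge values first,
--     # compute their signed total once, then one FORWARD pass distributes the
--     # signed suffix sums (the value each level must gain). Mutates the inner
--     # lists in place and returns the outer list, like A.
--     levels = list_of_differences
--     if not levels:
--         return levels
--     s = -1 if reverse else 1
--     edges = [(l[0] if reverse else l[-1]) for l in levels[:-1]]
--     total = 0
--     sign = 1
--     for e in edges:
--         total += sign * e
--         sign *= s
--     sign = 1
--     for l, e in zip(levels[:-1], edges):
--         if reverse:
--             l.insert(0, sign * total)
--         else:
--             l.append(sign * total)
--         total -= sign * e
--         sign *= s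
--     if reverse:
--         levels[-1].insert(0, 0)
--     else:
--         levels[-1].append(0)
--     return list_of_differences
-- ===== Notes on version B (the rewrite author's own statement) =====
-- stated objective: alternative
-- what changed: B drops A's backward accumulation over the repeatedly re-sliced reversed list entirely: it reads all edge values up front, forms their signed total once, and a single forward top-down pass hands each level its signed suffix sum (v_k = e_k + s*v_{k+1} solved in closed form as v_k = sign_k * remaining total); no reversal occurs anywhere.
import Mathlib
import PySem

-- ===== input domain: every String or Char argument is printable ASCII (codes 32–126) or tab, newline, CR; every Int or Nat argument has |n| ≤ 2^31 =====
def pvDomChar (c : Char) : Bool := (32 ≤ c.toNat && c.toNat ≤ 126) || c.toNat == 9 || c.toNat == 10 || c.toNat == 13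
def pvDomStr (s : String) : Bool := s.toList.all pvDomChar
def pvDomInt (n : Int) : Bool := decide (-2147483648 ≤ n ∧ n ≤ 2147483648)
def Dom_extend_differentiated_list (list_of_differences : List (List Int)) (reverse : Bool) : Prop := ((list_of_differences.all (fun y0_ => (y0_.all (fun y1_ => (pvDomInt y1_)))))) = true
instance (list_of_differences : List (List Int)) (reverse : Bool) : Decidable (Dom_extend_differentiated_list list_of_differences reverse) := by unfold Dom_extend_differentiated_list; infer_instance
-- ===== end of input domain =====

-- B replaces A's backward pass over the re-sliced reversed list by a staged algebraic algorithm: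
-- read all edge values first, form their signed total once, then one FORWARD pass distributes the
-- signed suffix sums (objective: alternative). Both A and B mutate the inner lists in place in
-- Python and return the outer list; the equivalence proved here is about the return value.

-- ===== PORT A =====
-- One iteration of A's `for i, lod in enumerate(list_of_differences[::-1])` loop (reverse=True):
-- `lod` is element `len-1-i` of the current outer list, in-place mutation is modelled by `List.set`,
-- and `list_of_differences[::-1][i-1]` re-reads the already-processed previous level from the freshly
-- reversed current list. `lod[0]` is `pyGetD … 0 0` (its IndexError input is excluded by Pre_).
def extendStepRev (cur : List (List Int)) (i : Nat) : List (List Int) :=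
  let lod := cur.getD (cur.length - 1 - i) []
  if i = 0 then
    cur.set (cur.length - 1 - i) (PySem.List.insert lod 0 0)
  else
    let amount_to_add := PySem.List.pyGetD (cur.reverse.getD (i - 1) []) 0 0
    cur.set (cur.length - 1 - i) (PySem.List.insert lod 0 (PySem.List.pyGetD lod 0 0 - amount_to_add))

-- Same for the reverse=False branch: `lod.append(x)` is `lod ++ [x]`, `lod[-1]` is `pyGetD lod (-1) 0`.
def extendStepFwd (cur : List (List Int)) (i : Nat) : List (List Int) :=
  let lod := cur.getD (cur.length - 1 - i) []
  if i = 0 then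
    cur.set (cur.length - 1 - i) (lod ++ [0])
  else
    let amount_to_add := PySem.List.pyGetD (cur.reverse.getD (i - 1) []) (-1) 0
    cur.set (cur.length - 1 - i) (lod ++ [PySem.List.pyGetD lod (-1) 0 + amount_to_add])

def extend_differentiated_list (list_of_differences : List (List Int)) (reverse : Bool) : List (List Int) :=
  if reverse then (List.range list_of_differences.length).foldl extendStepRev list_of_differences
  else (List.range list_of_differences.length).foldl extendStepFwd list_of_differences

-- ===== PORT B =====
-- B's stage 1: the per-level edge value `l[0] if reverse else l[-1]`.
def bEdge (reverse : Bool) (l : List Int) : Int :=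
  if reverse then PySem.List.pyGetD l 0 0 else PySem.List.pyGetD l (-1) 0

-- B's stage 3: `for l, e in zip(levels[:-1], edges): extend l by sign*total; total -= sign*e; sign *= s`.
def bLoop (reverse : Bool) (s : Int) : List (List Int × Int) → Int → Int → List (List Int)
  | [], _, _ => []
  | (l, e) :: rest, total, sign =>
    (if reverse then PySem.List.insert l 0 (sign * total) else l ++ [sign * total])
      :: bLoop reverse s rest (total - sign * e) (sign * s)

def extend_differentiated_list_alt (list_of_differences : List (List Int)) (reverse : Bool) : List (List Int) :=
  if list_of_differences.isEmpty then list_of_differences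
  else
    let s : Int := if reverse then -1 else 1
    let edges := list_of_differences.dropLast.map (bEdge reverse)
    -- stage 2: `total = 0; sign = 1; for e in edges: total += sign*e; sign *= s`
    let ts := edges.foldl (fun (p : Int × Int) e => (p.1 + p.2 * e, p.2 * s)) ((0 : Int), (1 : Int))
    bLoop reverse s (list_of_differences.dropLast.zip edges) ts.1 1
      ++ [if reverse then PySem.List.insert (list_of_differences.getLastD []) 0 0
          else list_of_differences.getLastD [] ++ [0]]

-- ===== PRECONDITION & SPEC =====
-- Pre_ excludes exactly the inputs on which Python A raises IndexError: an empty level other than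
-- the last one (A reads its lod[0] / lod[-1]; Python B raises IndexError there too).
def Pre_extend_differentiated_list (list_of_differences : List (List Int)) (reverse : Bool) : Prop :=
  (list_of_differences.dropLast.all (fun l => !l.isEmpty)) = true
instance (list_of_differences : List (List Int)) (reverse : Bool) : Decidable (Pre_extend_differentiated_list list_of_differences reverse) := by unfold Pre_extend_differentiated_list; infer_instance

def pvWitness_extend_differentiated_list : List (List Int) × Bool := ([[0, 3, 6, 9], [3, 3, 3], [0, 0]], false)

def Spec_extend_differentiated_list (list_of_differences : List (List Int)) (reverse : Bool) (out : List (List Int)) : Prop := out = extend_differentiated_list_alt list_of_differences reverse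
instance (list_of_differences : List (List Int)) (reverse : Bool) (out : List (List Int)) : Decidable (Spec_extend_differentiated_list list_of_differences reverse out) := by unfold Spec_extend_differentiated_list; infer_instance

-- ===== CLAIM (what is proved, stated in full; the proofs are below) =====
def Claim_equal_extend_differentiated_list : Prop := ∀ (list_of_differences : List (List Int)) (reverse : Bool), Dom_extend_differentiated_list list_of_differences reverse → Pre_extend_differentiated_list list_of_differences reverse → Spec_extend_differentiated_list list_of_differences reverse (extend_differentiated_list list_of_differences reverse)

-- ===== LEMMAS AND PROOFS =====

-- Generic scheme covering both branches of A at once: `f0` extends the first (deepest) level,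
-- `h l c` extends a later level `l` with the value `c`, `g l a` computes that value from the amount
-- `a` read from the previous level, `rd` reads the added value back from an extended level.
def gStep (f0 : List Int → List Int) (rd : List Int → Int) (g : List Int → Int → Int)
    (h : List Int → Int → List Int) (cur : List (List Int)) (i : Nat) : List (List Int) :=
  let lod := cur.getD (cur.length - 1 - i) []
  if i = 0 then cur.set (cur.length - 1 - i) (f0 lod)
  else cur.set (cur.length - 1 - i) (h lod (g lod (rd (cur.reverse.getD (i - 1) []))))

def gLoop (g : List Int → Int → Int) (h : List Int → Int → List Int) :
    List (List Int) → Int → List (List Int)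
  | [], _ => []
  | lod :: rest, carry => h lod (g lod carry) :: gLoop g h rest (g lod carry)

def gCarry (g : List Int → Int → Int) : List (List Int) → Int → Int
  | [], c => c
  | lod :: rest, c => gCarry g rest (g lod c)

theorem gLoop_length (g : List Int → Int → Int) (h : List Int → Int → List Int)
    (ys : List (List Int)) (c : Int) : (gLoop g h ys c).length = ys.length := by
  induction ys generalizing c with
  | nil => rfl
  | cons y t ih => simp [gLoop, ih]

theorem gLoop_append_singleton (g : List Int → Int → Int) (h : List Int → Int → List Int)
    (ys : List (List Int)) (z : List Int) (c : Int) :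
    gLoop g h (ys ++ [z]) c = gLoop g h ys c ++ [h z (g z (gCarry g ys c))] := by
  induction ys generalizing c with
  | nil => rfl
  | cons y t ih => simp [gLoop, gCarry, ih]

theorem gCarry_append (g : List Int → Int → Int) (ys : List (List Int)) (z : List Int) (c : Int) :
    gCarry g (ys ++ [z]) c = g z (gCarry g ys c) := by
  induction ys generalizing c with
  | nil => rfl
  | cons y t ih => simp [gCarry, ih]

-- The amount A re-reads from the previous (already extended) level is exactly the running carry.
theorem rd_last (rd : List Int → Int) (g : List Int → Int → Int) (h : List Int → Int → List Int)
    (hrd : ∀ l c, rd (h l c) = c) (ys : List (List Int)) (f : List Int) (c : Int)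
    (hf : rd f = c) : rd ((f :: gLoop g h ys c).getD ys.length []) = gCarry g ys c := by
  induction ys generalizing f c with
  | nil => simpa [gCarry] using hf
  | cons y t ih =>
    simpa [gLoop, gCarry] using ih (h y (g y c)) (g y c) (hrd _ _)

-- Loop invariant: after k iterations of A's loop the last k levels are exactly the one-pass result
-- on the reversed list, the first n-k levels are untouched.
theorem gInv (f0 : List Int → List Int) (rd : List Int → Int) (g : List Int → Int → Int)
    (h : List Int → Int → List Int) (hrd : ∀ l c, rd (h l c) = c) (hrd0 : ∀ l, rd (f0 l) = 0)
    (ys : List (List Int)) (first : List Int) :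
    ∀ k, 1 ≤ k → k ≤ ys.length + 1 →
    (List.range k).foldl (gStep f0 rd g h) (ys ++ [first])
      = ys.take (ys.length + 1 - k)
        ++ (f0 first :: gLoop g h (ys.reverse.take (k - 1)) 0).reverse := by
  intro k
  induction k with
  | zero => omega
  | succ k ih =>
    intro _ hk2
    rcases Nat.eq_zero_or_pos k with hk | hk
    · subst hk
      rw [show List.range 1 = [0] from rfl]
      simp only [List.foldl_cons, List.foldl_nil, gStep]
      rw [show (ys ++ [first]).length = ys.length + 1 from by simp,
        show ys.length + 1 - 1 - 0 = ys.length from by omega]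
      rw [show (ys ++ [first]).getD ys.length [] = first from by simp [List.getD]]
      rw [List.set_append]
      simp [gLoop]
    · have hk1 : 1 ≤ k := hk
      have hk2' : k ≤ ys.length + 1 := by omega
      have hkys : k ≤ ys.length := by omega
      rw [List.range_succ, List.foldl_append, ih hk1 hk2']
      simp only [List.foldl_cons, List.foldl_nil]
      set T := ys.reverse.take (k - 1) with hT
      set L := f0 first :: gLoop g h T 0 with hL
      have hTlen : T.length = k - 1 := by
        rw [hT]; simp; omega
      have hLlen : L.length = k := by
        rw [hL]; simp [gLoop_length, hTlen]; omega
      set m := ys.length - k with hm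
      have htake : ys.length + 1 - k = m + 1 := by omega
      rw [htake]
      set cur := ys.take (m + 1) ++ L.reverse with hcur
      have hcurlen : cur.length = ys.length + 1 := by
        rw [hcur]; simp [hLlen]; omega
      have hidx : cur.length - 1 - k = m := by omega
      have hz : m < ys.length := by omega
      have hlod : cur.getD (cur.length - 1 - k) [] = ys[m] := by
        rw [hidx, hcur, List.getD, List.getElem?_append_left (by simp; omega),
          List.getElem?_take_of_lt (by omega)]
        simp [List.getElem?_eq_getElem hz]
      have hread : cur.reverse.getD (k - 1) [] = L.getD (k - 1) [] := by
        rw [hcur]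
        rw [List.reverse_append, List.reverse_reverse]
        rw [List.getD, List.getElem?_append_left (by omega), ← List.getD]
      have hrdval : rd (cur.reverse.getD (k - 1) []) = gCarry g T 0 := by
        rw [hread, hL, ← hTlen]
        exact rd_last rd g h hrd T (f0 first) 0 (hrd0 first)
      have hk1' : k - 1 < ys.reverse.length := by simp; omega
      have hys_rev_take : ys.reverse.take k = T ++ [ys[m]] := by
        have e1 : ys.reverse.take (k-1+1) = ys.reverse.take (k-1) ++ [ys.reverse[k-1]] :=
          List.take_succ_eq_append_getElem hk1'
        have e2 : ys.reverse[k-1]'hk1' = ys[m] := by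
          rw [List.getElem_reverse]; congr 1; omega
        rw [hT, ← e2, ← e1]
        congr 1
        omega
      simp only [gStep, if_neg (by omega : ¬ k = 0)]
      rw [hlod, hrdval, hidx]
      rw [hcur, List.set_append, if_pos (by simp; omega)]
      rw [List.take_succ_eq_append_getElem hz, List.set_append]
      rw [show (List.take m ys).length = m from by simp; omega]
      simp only [lt_irrefl, if_false, Nat.sub_self, List.set_cons_zero]
      rw [show ys.length + 1 - (k + 1) = m from by omega,
        show k + 1 - 1 = k from rfl, hys_rev_take, gLoop_append_singleton]
      simp [List.reverse_append, hL]

-- The two branches of A are instances of the generic scheme.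
theorem stepRev_eq : extendStepRev = gStep (fun l => PySem.List.insert l 0 0)
    (fun l => PySem.List.pyGetD l 0 0) (fun l a => PySem.List.pyGetD l 0 0 - a)
    (fun l c => PySem.List.insert l 0 c) := rfl

theorem stepFwd_eq : extendStepFwd = gStep (fun l => l ++ [0])
    (fun l => PySem.List.pyGetD l (-1) 0) (fun l a => PySem.List.pyGetD l (-1) 0 + a)
    (fun l c => l ++ [c]) := rfl

theorem hrdR : ∀ (l : List Int) (c : Int),
    (fun l => PySem.List.pyGetD l 0 0) ((fun l c => PySem.List.insert l 0 c) l c) = c := by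
  intro l c; simp [PySem.List.insert_zero, PySem.List.pyGetD_zero_cons]

theorem hrd0R : ∀ (l : List Int),
    (fun l => PySem.List.pyGetD l 0 0) ((fun l => PySem.List.insert l 0 0) l) = 0 := by
  intro l; simp [PySem.List.insert_zero, PySem.List.pyGetD_zero_cons]

theorem hrdF : ∀ (l : List Int) (c : Int),
    (fun l => PySem.List.pyGetD l (-1) 0) ((fun l c => l ++ [c]) l c) = c := by
  intro l c; simp [PySem.List.pyGetD_neg_one_append_singleton]

theorem hrd0F : ∀ (l : List Int),
    (fun l => PySem.List.pyGetD l (-1) 0) ((fun l => l ++ [0]) l) = 0 := by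
  intro l; simp [PySem.List.pyGetD_neg_one_append_singleton]

theorem foldRev_eq (rest : List (List Int)) (first : List Int) :
    (List.range ((rest.reverse ++ [first]).length)).foldl extendStepRev (rest.reverse ++ [first])
      = (PySem.List.insert first 0 0
          :: gLoop (fun l a => PySem.List.pyGetD l 0 0 - a) (fun l c => PySem.List.insert l 0 c) rest 0).reverse := by
  rw [stepRev_eq]
  have h := gInv (fun l => PySem.List.insert l 0 0) (fun l => PySem.List.pyGetD l 0 0)
    (fun l a => PySem.List.pyGetD l 0 0 - a) (fun l c => PySem.List.insert l 0 c)
    hrdR hrd0R rest.reverse first (rest.reverse.length + 1) (by omega) (by omega)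
  simp only [List.length_reverse, Nat.add_sub_cancel, Nat.sub_self, List.take_zero,
    List.nil_append, List.reverse_reverse, List.take_length] at h
  simpa using h

theorem foldFwd_eq (rest : List (List Int)) (first : List Int) :
    (List.range ((rest.reverse ++ [first]).length)).foldl extendStepFwd (rest.reverse ++ [first])
      = ((first ++ [0])
          :: gLoop (fun l a => PySem.List.pyGetD l (-1) 0 + a) (fun l c => l ++ [c]) rest 0).reverse := by
  rw [stepFwd_eq]
  have h := gInv (fun l => l ++ [0]) (fun l => PySem.List.pyGetD l (-1) 0)
    (fun l a => PySem.List.pyGetD l (-1) 0 + a) (fun l c => l ++ [c])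
    hrdF hrd0F rest.reverse first (rest.reverse.length + 1) (by omega) (by omega)
  simp only [List.length_reverse, Nat.add_sub_cancel, Nat.sub_self, List.take_zero,
    List.nil_append, List.reverse_reverse, List.take_length] at h
  simpa using h

-- ==== B-side characterisation: signed suffix sums ====

-- Vs s [e0, e1, …] = e0 + s*e1 + s²*e2 + … : the value added to the level whose edge is e0.
def Vs (s : Int) : List Int → Int
  | [] => 0
  | e :: es => e + s * Vs s es

-- The common target: every level (top-down) extended by the signed suffix sum of the edges.
def Tlist (edge : List Int → Int) (s : Int) (h : List Int → Int → List Int) :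
    List (List Int) → List (List Int)
  | [] => []
  | l :: ls => h l (edge l + s * Vs s (ls.map edge)) :: Tlist edge s h ls

-- A's carry over the reversed list is the signed suffix sum.
theorem gCarry_rev (g : List Int → Int → Int) (edge : List Int → Int) (s : Int)
    (hg : ∀ l c, g l c = edge l + s * c) (ls : List (List Int)) :
    gCarry g ls.reverse 0 = Vs s (ls.map edge) := by
  induction ls with
  | nil => rfl
  | cons l tl ih =>
    calc gCarry g (l :: tl).reverse 0 = g l (gCarry g tl.reverse 0) := by
          simp [gCarry_append]
      _ = Vs s ((l :: tl).map edge) := by rw [hg, ih]; simp [Vs]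

-- A's reversed one-pass result equals the top-down suffix-sum picture.
theorem gLoop_rev (g : List Int → Int → Int) (h : List Int → Int → List Int)
    (edge : List Int → Int) (s : Int) (hg : ∀ l c, g l c = edge l + s * c)
    (ls : List (List Int)) :
    (gLoop g h ls.reverse 0).reverse = Tlist edge s h ls := by
  induction ls with
  | nil => rfl
  | cons l tl ih =>
    have : (l :: tl).reverse = tl.reverse ++ [l] := by simp
    rw [this, gLoop_append_singleton]
    simp only [List.reverse_append, List.reverse_cons, List.reverse_nil, List.nil_append,
      List.cons_append]
    rw [ih, hg, gCarry_rev g edge s hg tl]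
    rfl

-- B's stage-2 total is the full signed sum.
theorem total_eq (s : Int) (es : List Int) : ∀ (t σ : Int),
    (es.foldl (fun (p : Int × Int) e => (p.1 + p.2 * e, p.2 * s)) (t, σ)).1 = t + σ * Vs s es := by
  induction es with
  | nil => intro t σ; simp [Vs]
  | cons e es' ih =>
    intro t σ
    simp only [List.foldl_cons, ih, Vs]
    ring

-- B's stage-3 forward pass realises the suffix sums.
theorem bLoop_eq (reverse : Bool) (s : Int) (hs : s * s = 1) (ls : List (List Int)) :
    ∀ (σ : Int), σ * σ = 1 →
    bLoop reverse s (ls.zip (ls.map (bEdge reverse))) (σ * Vs s (ls.map (bEdge reverse))) σ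
      = Tlist (bEdge reverse) s
          (fun l c => if reverse then PySem.List.insert l 0 c else l ++ [c]) ls := by
  induction ls with
  | nil => intro σ _; rfl
  | cons l tl ih =>
    intro σ hσ
    simp only [List.map_cons, List.zip_cons_cons, bLoop, Tlist]
    have hhead : σ * (σ * Vs s (bEdge reverse l :: tl.map (bEdge reverse)))
        = bEdge reverse l + s * Vs s (tl.map (bEdge reverse)) := by
      simp only [Vs]; rw [← mul_assoc, hσ, one_mul]
    have htail : σ * Vs s (bEdge reverse l :: tl.map (bEdge reverse)) - σ * bEdge reverse l
        = (σ * s) * Vs s (tl.map (bEdge reverse)) := by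
      simp only [Vs]; ring
    have hσs : (σ * s) * (σ * s) = 1 := by
      calc (σ * s) * (σ * s) = (σ * σ) * (s * s) := by ring
        _ = 1 := by rw [hσ, hs]; ring
    rw [hhead, htail, ih (σ * s) hσs]

-- ===== VERDICT (by name: the statement is the Claim_ definition above) =====
theorem extend_differentiated_list_spec : Claim_equal_extend_differentiated_list := by
  unfold Claim_equal_extend_differentiated_list
  intro xs reverse _ _
  unfold Spec_extend_differentiated_list extend_differentiated_list extend_differentiated_list_alt
  cases hx : xs.reverse with
  | nil =>
    have hnil : xs = [] := by simpa using congrArg List.reverse hx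
    subst hnil
    cases reverse <;> rfl
  | cons first rest =>
    have hxs : xs = rest.reverse ++ [first] := by
      have := congrArg List.reverse hx
      simpa using this
    subst hxs
    have hdrop : (rest.reverse ++ [first]).dropLast = rest.reverse := by simp
    have hlast : (rest.reverse ++ [first]).getLastD [] = first := by simp
    have hne : (rest.reverse ++ [first]).isEmpty = false := by simp
    cases reverse
    · -- forward (reverse = false), s = 1
      rw [if_neg (show ¬((rest.reverse ++ [first]).isEmpty = true) from by rw [hne]; simp)]
      simp only [Bool.false_eq_true, if_false, hdrop, hlast]
      rw [foldFwd_eq rest first]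
      have hA : ((first ++ [0])
          :: gLoop (fun l a => PySem.List.pyGetD l (-1) 0 + a) (fun l c => l ++ [c]) rest 0).reverse
          = (gLoop (fun l a => PySem.List.pyGetD l (-1) 0 + a) (fun l c => l ++ [c])
              ((rest.reverse).reverse) 0).reverse ++ [first ++ [0]] := by
        simp
      rw [hA, gLoop_rev _ _ (bEdge false) 1
        (by intro l c; simp [bEdge]) rest.reverse]
      rw [total_eq 1 (rest.reverse.map (bEdge false)) 0 1]
      have hb := bLoop_eq false 1 (by ring) rest.reverse 1 (by ring)
      simp only [Bool.false_eq_true, if_false] at hb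
      rw [show (0 : Int) + 1 * Vs 1 (rest.reverse.map (bEdge false))
          = 1 * Vs 1 (rest.reverse.map (bEdge false)) from by ring, hb]
    · -- backward (reverse = true), s = -1
      rw [if_neg (show ¬((rest.reverse ++ [first]).isEmpty = true) from by rw [hne]; simp)]
      simp only [if_true, hdrop, hlast]
      rw [foldRev_eq rest first]
      have hA : (PySem.List.insert first 0 0
          :: gLoop (fun l a => PySem.List.pyGetD l 0 0 - a) (fun l c => PySem.List.insert l 0 c) rest 0).reverse
          = (gLoop (fun l a => PySem.List.pyGetD l 0 0 - a) (fun l c => PySem.List.insert l 0 c)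
              ((rest.reverse).reverse) 0).reverse ++ [PySem.List.insert first 0 0] := by
        simp
      rw [hA, gLoop_rev _ _ (bEdge true) (-1)
        (by intro l c; simp [bEdge]; ring) rest.reverse]
      rw [total_eq (-1) (rest.reverse.map (bEdge true)) 0 1]
      have hb := bLoop_eq true (-1) (by ring) rest.reverse 1 (by ring)
      simp only [if_true] at hb
      rw [show (0 : Int) + 1 * Vs (-1) (rest.reverse.map (bEdge true))
          = 1 * Vs (-1) (rest.reverse.map (bEdge true)) from by ring, hb]
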